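-- pv_equiv track=rewrite | github.com/ChuangtaoChen-TUM/KVPacket | kv_packet/cache_comb/methods/sam_kv.py | get_or_indices
-- ===== SOURCE A (Python) =====
-- import itertools
--
-- def get_or_indices(indices_dict: dict[int, list[int]]):
--     max_indices = list(set(itertools.chain.from_iterable(list(indices_dict.values()))))
--     max_indices.sort()
--
--     index_map = {val: i for i, val in enumerate(max_indices)}
--     layer_indices = list(indices_dict.keys())
--     layer_indices.sort(reverse=True)
--
--     or_indices_dict_new: dict[int, list[int]] = {} # local index
--     indices_dict_new: dict[int, list[int]] = {} # local index
--     indices_set: set[int] = set()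
--     for layer_index in layer_indices:
--         indices_set = indices_set | set(indices_dict[layer_index])
--         indices_list = list(indices_set)
--         indices_list.sort()
--         or_indices_dict_new[layer_index] = [index_map[item] for item in indices_list]
--         indices_dict_new[layer_index] = [index_map[item] for item in indices_dict[layer_index]]
--
--     for layer_index in range(layer_indices[0], -1, -1):
--         if layer_index not in or_indices_dict_new:
--             or_indices_dict_new[layer_index] = or_indices_dict_new[layer_index+1]
--
--     return indices_dict_new, or_indices_dict_new, max_indices
-- ===== SOURCE B (Python) =====
-- def get_or_indices(indices_dict):
--     max_indices = sorted({v for vals in indices_dict.values() for v in vals})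
--     rank = {v: i for i, v in enumerate(max_indices)}
--     layers = sorted(indices_dict.keys(), reverse=True)
--
--     indices_dict_new = {}
--     or_indices_dict_new = {}
--     cum = []  # running sorted cumulative list of local indices
--     for layer in layers:
--         mapped = [rank[v] for v in indices_dict[layer]]
--         indices_dict_new[layer] = mapped
--         cum = cum.copy()
--         for m in mapped:
--             # binary search for the insertion point of m in the sorted list cum
--             lo, hi = 0, len(cum)
--             while lo < hi:
--                 mid = (lo + hi) // 2
--                 if cum[mid] < m:
--                     lo = mid + 1
--                 else:
--                     hi = mid
--             if lo == len(cum) or cum[lo] != m: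
--                 cum.insert(lo, m)
--         or_indices_dict_new[layer] = cum
--
--     prev = or_indices_dict_new[layers[0]]
--     for layer in range(layers[0] - 1, -1, -1):
--         if layer in or_indices_dict_new:
--             prev = or_indices_dict_new[layer]
--         else:
--             or_indices_dict_new[layer] = prev
--     return indices_dict_new, or_indices_dict_new, max_indices
-- ===== Notes on version B (the rewrite author's own statement) =====
-- stated objective: faster
-- what changed: Instead of re-sorting the whole growing cumulative index set and re-mapping every element through the index dict on each layer, B maps each layer's indices to local ranks once and binary-search-inserts only the layer's new ranks into a running sorted cumulative list; the gap-filling pass carries the previous or-list in an accumulator instead of re-reading the dict at layer+1.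
import Mathlib
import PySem

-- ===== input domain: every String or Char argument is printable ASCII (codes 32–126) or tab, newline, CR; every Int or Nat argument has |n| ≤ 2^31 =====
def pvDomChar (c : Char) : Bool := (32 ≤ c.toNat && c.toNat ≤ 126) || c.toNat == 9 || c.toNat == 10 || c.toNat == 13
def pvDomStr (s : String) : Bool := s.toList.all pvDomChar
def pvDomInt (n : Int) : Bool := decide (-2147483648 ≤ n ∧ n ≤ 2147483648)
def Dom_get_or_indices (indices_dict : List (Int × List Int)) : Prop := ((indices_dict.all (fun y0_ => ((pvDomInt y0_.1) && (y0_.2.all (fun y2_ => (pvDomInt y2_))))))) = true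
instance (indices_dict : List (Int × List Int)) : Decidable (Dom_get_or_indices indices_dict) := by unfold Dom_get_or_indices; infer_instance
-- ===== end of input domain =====

-- B replaces A's per-layer full re-sort of the growing cumulative set (and per-layer re-mapping
-- through the index dictionary) by binary-search insertion of each layer's few new local ranks
-- into a running sorted cumulative list (objective: faster).

-- ===== PORT A =====
def get_or_indices (indices_dict : List (Int × List Int)) : (List (Int × List Int)) × (List (Int × List Int)) × List Int :=
  let d := PySem.Dict.mk indices_dict
  let max_indices := PySem.List.sorted (PySem.Set.ofList d.values.flatten) (fun x => x)
  let index_map := (PySem.List.enumerate max_indices).foldl (fun m p => m.insert p.2 p.1) PySem.Dict.empty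
  let layer_indices := PySem.List.sorted d.keys (fun x => x) true
  -- index_map[item] never raises (every item comes from max_indices); getD's default is never used
  let st := layer_indices.foldl (fun st L =>
      let iset := PySem.Set.union st.2.2 (PySem.Set.ofList (d.getD L []))
      let indices_list := PySem.List.sorted iset (fun x => x)
      (st.1.insert L (indices_list.map (fun v => index_map.getD v 0)),
       st.2.1.insert L ((d.getD L []).map (fun v => index_map.getD v 0)),
       iset))
    ((PySem.Dict.empty : PySem.Dict Int (List Int)), (PySem.Dict.empty : PySem.Dict Int (List Int)), (PySem.Set.empty : PySem.Set Int))
  -- layer_indices[0] raises IndexError on an empty dict: excluded by Pre_; under Pre_ the defaults below are never used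
  let t0 := PySem.List.pyGetD layer_indices 0 0
  let orD := (PySem.List.pyRange t0 (-1) (-1)).foldl
      (fun od l => if od.contains l then od else od.insert l (od.getD (l + 1) [])) st.1
  (st.2.1.items, orD.items, max_indices)

-- ===== PORT B =====
-- the inner 'while lo < hi' binary search of Source B (lo, hi are nonnegative list indices, so Nat;
-- Nat division (lo+hi)/2 is exact for Python's // on nonnegative ints; cum[mid] is ported with
-- List.getD, exact because mid < hi <= len(cum) throughout the loop)
def bfind (cum : List Int) (m : Int) (lo hi : Nat) : Nat :=
  if lo < hi then
    let mid := (lo + hi) / 2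
    if cum.getD mid 0 < m then bfind cum m (mid + 1) hi else bfind cum m lo mid
  else lo
termination_by hi - lo
decreasing_by all_goals omega

-- the body of Source B's 'for m in mapped' loop: insert m into the sorted list cum if absent
-- (cum[lo] ported with List.getD, exact: the || short-circuits when lo = len(cum))
def binIns (cum : List Int) (m : Int) : List Int :=
  let lo := bfind cum m 0 cum.length
  if lo == cum.length || !(cum.getD lo 0 == m) then PySem.List.insert cum (lo : Int) m else cum

def get_or_indices_alt (indices_dict : List (Int × List Int)) : (List (Int × List Int)) × (List (Int × List Int)) × List Int :=
  let d := PySem.Dict.mk indices_dict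
  let max_indices := PySem.List.sorted (PySem.Set.ofList d.values.flatten) (fun x => x)
  let rank := (PySem.List.enumerate max_indices).foldl (fun m p => m.insert p.2 p.1) PySem.Dict.empty
  let layers := PySem.List.sorted d.keys (fun x => x) true
  -- cum.copy() is the identity on immutable Lean lists
  let st := layers.foldl (fun st L =>
      let mapped := (d.getD L []).map (fun v => rank.getD v 0)
      let cum := mapped.foldl (fun cum m => binIns cum m) st.2.2
      (st.1.insert L mapped, st.2.1.insert L cum, cum))
    ((PySem.Dict.empty : PySem.Dict Int (List Int)), (PySem.Dict.empty : PySem.Dict Int (List Int)), ([] : List Int))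
  -- layers[0] raises IndexError on an empty dict: excluded by Pre_; the defaults below are never used under Pre_
  let t0 := PySem.List.pyGetD layers 0 0
  let fill := (PySem.List.pyRange (t0 - 1) (-1) (-1)).foldl
      (fun s l => if s.1.contains l then (s.1, s.1.getD l []) else (s.1.insert l s.2, s.2))
      (st.2.1, st.2.1.getD t0 [])
  (st.1.items, fill.1.items, max_indices)

-- ===== PRECONDITION & SPEC =====
-- Python A evaluates layer_indices[0], an IndexError on the empty dict: Pre_ excludes only the empty dict.
def Pre_get_or_indices (indices_dict : List (Int × List Int)) : Prop := indices_dict ≠ []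
instance (indices_dict : List (Int × List Int)) : Decidable (Pre_get_or_indices indices_dict) := by unfold Pre_get_or_indices; infer_instance
def pvWitness_get_or_indices : (List (Int × List Int)) := [(2, [5, 3]), (0, [7])]

def Spec_get_or_indices (indices_dict : List (Int × List Int)) (out : (List (Int × List Int)) × (List (Int × List Int)) × List Int) : Prop := out = get_or_indices_alt indices_dict
instance (indices_dict : List (Int × List Int)) (out : (List (Int × List Int)) × (List (Int × List Int)) × List Int) : Decidable (Spec_get_or_indices indices_dict out) := by unfold Spec_get_or_indices; infer_instance

-- ===== CLAIM (what is proved, stated in full; the proofs are below) =====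
def Claim_equal_get_or_indices : Prop := ∀ (indices_dict : List (Int × List Int)), Dom_get_or_indices indices_dict → Pre_get_or_indices indices_dict → Spec_get_or_indices indices_dict (get_or_indices indices_dict)

-- ===== LEMMAS AND PROOFS =====

-- two strictly increasing integer lists with the same members are equal
theorem pv_eq_of_pairwise_lt_mem {l1 l2 : List Int}
    (h1 : l1.Pairwise (· < ·)) (h2 : l2.Pairwise (· < ·))
    (hm : ∀ x, x ∈ l1 ↔ x ∈ l2) : l1 = l2 := by
  have nd1 : l1.Nodup := h1.imp (fun h => ne_of_lt h)
  have nd2 : l2.Nodup := h2.imp (fun h => ne_of_lt h)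
  have hp : l1.Perm l2 := (List.perm_ext_iff_of_nodup nd1 nd2).mpr hm
  exact hp.eq_of_pairwise (fun a b _ _ hab hba => le_antisymm hab hba)
    (h1.imp le_of_lt) (h2.imp le_of_lt)

theorem pv_sorted_pairwise_lt (s : List Int) (hnd : s.Nodup) :
    (PySem.List.sorted s (fun x => x)).Pairwise (· < ·) := by
  have hle := PySem.List.sorted_pairwise s (fun x => x)
  have hnd' : (PySem.List.sorted s (fun x => x)).Nodup :=
    (List.Perm.nodup_iff (PySem.List.sorted_perm s (fun x => x) false)).mpr hnd
  exact (hle.and hnd').imp (fun h => lt_of_le_of_ne h.1 h.2)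

-- mapping a function strictly monotone on M over a strictly increasing list of members of M
theorem pv_map_pairwise_lt (M : List Int) (r : Int → Int)
    (hmono : ∀ a b, a ∈ M → b ∈ M → a < b → r a < r b)
    (l : List Int) (hl : l.Pairwise (· < ·)) (hsub : ∀ v ∈ l, v ∈ M) :
    (l.map r).Pairwise (· < ·) := by
  rw [List.pairwise_map]
  exact hl.imp_of_mem (fun ha hb hab => hmono _ _ (hsub _ ha) (hsub _ hb) hab)

theorem bfind_spec (cum : List Int) (m : Int) (hs : cum.Pairwise (· < ·)) :
    ∀ lo hi, lo ≤ hi → hi ≤ cum.length →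
    (∀ i (h : i < cum.length), i < lo → cum[i] < m) →
    (∀ i (h : i < cum.length), hi ≤ i → m ≤ cum[i]) →
    lo ≤ bfind cum m lo hi ∧ bfind cum m lo hi ≤ hi ∧
    (∀ i (h : i < cum.length), i < bfind cum m lo hi → cum[i] < m) ∧
    (∀ i (h : i < cum.length), bfind cum m lo hi ≤ i → m ≤ cum[i]) := by
  intro lo hi
  fun_induction bfind cum m lo hi with
  | case1 lo hi hlt mid hmid ih =>
    intro hle hhi hpre hsuf
    have hmlt : mid < cum.length := by omega
    have hgd : cum.getD mid 0 = cum[mid] := List.getD_eq_getElem cum 0 hmlt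
    have hpre' : ∀ i (h : i < cum.length), i < mid + 1 → cum[i] < m := by
      intro i h hi2
      rcases Nat.lt_or_ge i mid with h2 | h2
      · calc cum[i] < cum[mid] := List.pairwise_iff_getElem.mp hs i mid h hmlt h2
          _ < m := by rw [← hgd]; exact hmid
      · have : i = mid := by omega
        subst this; rw [← hgd]; exact hmid
    have := ih (by omega) hhi hpre' hsuf
    exact ⟨by omega, this.2.1, this.2.2.1, this.2.2.2⟩
  | case2 lo hi hlt mid hmid ih =>
    intro hle hhi hpre hsuf
    have hmlt : mid < cum.length := by omega
    have hgd : cum.getD mid 0 = cum[mid] := List.getD_eq_getElem cum 0 hmlt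
    have hsuf' : ∀ i (h : i < cum.length), mid ≤ i → m ≤ cum[i] := by
      intro i h hi2
      rcases Nat.lt_or_ge mid i with h2 | h2
      · have : cum[mid] < cum[i] := List.pairwise_iff_getElem.mp hs mid i hmlt h h2
        have hm : m ≤ cum[mid] := by rw [← hgd]; omega
        omega
      · have : i = mid := by omega
        subst this; rw [← hgd]; omega
    have := ih (by omega) (by omega) hpre hsuf'
    exact ⟨this.1, by omega, this.2.2.1, this.2.2.2⟩
  | case3 lo hi hlt =>
    intro hle hhi hpre hsuf
    have : lo = hi := by omega
    subst this
    exact ⟨le_refl _, le_refl _, hpre, hsuf⟩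

theorem binIns_char (cum : List Int) (m : Int) (hs : cum.Pairwise (· < ·)) :
    (binIns cum m).Pairwise (· < ·) ∧ ∀ x, (x ∈ binIns cum m ↔ x ∈ cum ∨ x = m) := by
  have hspec := bfind_spec cum m hs 0 cum.length (Nat.zero_le _) (le_refl _)
    (by intro i h hi; omega) (by intro i h hi; omega)
  simp only [binIns]
  generalize hgen : bfind cum m 0 cum.length = lo at hspec ⊢
  obtain ⟨-, hlen, hpre, hsuf⟩ := hspec
  by_cases hl : lo = cum.length
  · subst hl
    simp only [beq_self_eq_true, Bool.true_or, if_true]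
    rw [PySem.List.insert_natCast cum _ m (le_refl _)]
    simp only [List.take_length, List.drop_length]
    constructor
    · rw [List.pairwise_append]
      exact ⟨hs, List.pairwise_singleton _ _, by
        intro a ha b hb
        obtain ⟨i, h, rfl⟩ := List.mem_iff_getElem.mp ha
        simp at hb
        subst hb
        exact hpre i h h⟩
    · intro x; simp
  · have hllt : lo < cum.length := by omega
    have hgd : cum.getD lo 0 = cum[lo] := List.getD_eq_getElem cum 0 hllt
    by_cases he : cum[lo] = m
    · have : (lo == cum.length || !(cum.getD lo 0 == m)) = false := by
        rw [hgd, he]; simp [hl]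
      rw [this]
      simp only [Bool.false_eq_true, if_false]
      refine ⟨hs, fun x => ⟨Or.inl, ?_⟩⟩
      rintro (h | rfl)
      · exact h
      · exact he ▸ List.getElem_mem hllt
    · have : (lo == cum.length || !(cum.getD lo 0 == m)) = true := by
        rw [hgd]; simp [he]
      rw [this, if_pos rfl]
      rw [PySem.List.insert_natCast cum _ m (by omega)]
      have hmlt : m < cum[lo] := lt_of_le_of_ne (hsuf lo hllt (le_refl _)) (fun h => he h.symm)
      constructor
      · rw [List.pairwise_append]
        refine ⟨hs.sublist (List.take_sublist _ _), ?_, ?_⟩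
        · rw [List.pairwise_cons]
          refine ⟨?_, hs.sublist (List.drop_sublist _ _)⟩
          intro y hy
          obtain ⟨j, hj, rfl⟩ := List.mem_iff_getElem.mp hy
          have hjl : lo + j < cum.length := by simp [List.length_drop] at hj; omega
          rw [List.getElem_drop]
          rcases Nat.eq_zero_or_pos j with rfl | hj0
          · simpa using hmlt
          · calc m < cum[lo] := hmlt
              _ < cum[lo + j] := List.pairwise_iff_getElem.mp hs lo (lo + j) hllt hjl (by omega)
        · intro a ha b hb
          obtain ⟨i, hi, rfl⟩ := List.mem_iff_getElem.mp ha
          have hilo : i < lo := by simp [List.length_take] at hi; omega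
          have ham : (List.take lo cum)[i] < m := by
            rw [List.getElem_take]; exact hpre i (by omega) hilo
          rcases List.mem_cons.mp hb with rfl | hb2
          · exact ham
          · obtain ⟨j, hj, rfl⟩ := List.mem_iff_getElem.mp hb2
            have hjl : lo + j < cum.length := by simp [List.length_drop] at hj; omega
            rw [List.getElem_drop]
            have h2 : m ≤ cum[lo + j] := hsuf (lo + j) hjl (by omega)
            calc (List.take lo cum)[i] < m := ham
              _ ≤ cum[lo + j] := h2
      · intro x
        constructor
        · intro hx
          rcases List.mem_append.mp hx with h | h
          · exact Or.inl (List.mem_of_mem_take h)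
          · rcases List.mem_cons.mp h with rfl | h2
            · exact Or.inr rfl
            · exact Or.inl (List.mem_of_mem_drop h2)
        · rintro (hx | rfl)
          · rw [← List.take_append_drop lo cum] at hx
            rcases List.mem_append.mp hx with h | h
            · exact List.mem_append.mpr (Or.inl h)
            · exact List.mem_append.mpr (Or.inr (List.mem_cons_of_mem _ h))
          · exact List.mem_append.mpr (Or.inr List.mem_cons_self)

theorem pv_foldl_binIns_char (ms : List Int) : ∀ cum : List Int, cum.Pairwise (· < ·) →
    (ms.foldl (fun cum m => binIns cum m) cum).Pairwise (· < ·) ∧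
    ∀ x, x ∈ ms.foldl (fun cum m => binIns cum m) cum ↔ x ∈ cum ∨ x ∈ ms := by
  induction ms with
  | nil => intro cum hc; simpa using hc
  | cons m t ih =>
    intro cum hc
    rw [List.foldl_cons]
    obtain ⟨hbp, hbm⟩ := binIns_char cum m hc
    obtain ⟨hp, hm⟩ := ih (binIns cum m) hbp
    refine ⟨hp, fun x => ?_⟩
    rw [hm x, hbm x]
    simp only [List.mem_cons]
    tauto

theorem pv_bin_step (M : List Int) (r : Int → Int)
    (hmono : ∀ a b, a ∈ M → b ∈ M → a < b → r a < r b)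
    (iset vals : List Int) (hnd : iset.Nodup)
    (hsub : ∀ v ∈ iset, v ∈ M) (hvs : ∀ v ∈ vals, v ∈ M) :
    (vals.map r).foldl (fun cum m => binIns cum m) ((PySem.List.sorted iset (fun x => x)).map r)
      = (PySem.List.sorted (PySem.Set.union iset (PySem.Set.ofList vals)) (fun x => x)).map r := by
  have p1 : ((PySem.List.sorted iset (fun x => x)).map r).Pairwise (· < ·) :=
    pv_map_pairwise_lt M r hmono _ (pv_sorted_pairwise_lt iset hnd)
      (fun v hv => hsub v ((PySem.List.mem_sorted _ _ _ _).mp hv))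
  obtain ⟨pL, hmem⟩ := pv_foldl_binIns_char (vals.map r) _ p1
  have hndU : (PySem.Set.union iset (PySem.Set.ofList vals)).Nodup :=
    PySem.Set.nodup_union _ _ hnd
  have pR : ((PySem.List.sorted (PySem.Set.union iset (PySem.Set.ofList vals)) (fun x => x)).map r).Pairwise (· < ·) := by
    refine pv_map_pairwise_lt M r hmono _ (pv_sorted_pairwise_lt _ hndU) ?_
    intro v hv
    rw [PySem.List.mem_sorted] at hv
    rcases (PySem.Set.mem_union _ _ _).mp hv with h | h
    · exact hsub v h
    · exact hvs v ((PySem.Set.mem_ofList _ _).mp h)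
  refine pv_eq_of_pairwise_lt_mem pL pR ?_
  intro x
  rw [hmem x]
  simp only [List.mem_map, PySem.List.mem_sorted, PySem.Set.mem_ofList, PySem.Set.mem_union]
  constructor
  · rintro (⟨v, hv, rfl⟩ | ⟨v, hv, rfl⟩)
    · exact ⟨v, Or.inl hv, rfl⟩
    · exact ⟨v, Or.inr hv, rfl⟩
  · rintro ⟨v, hv | hv, rfl⟩
    · exact Or.inl ⟨v, hv, rfl⟩
    · exact Or.inr ⟨v, hv, rfl⟩


-- the rank dictionary built from enumerate: getD at the i-th element of a Nodup list is i
theorem pv_rank_getD (l : List Int) (hnd : l.Nodup) (i : Nat) (hi : i < l.length) :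
    ((PySem.List.enumerate l).foldl (fun m p => m.insert p.2 p.1) (PySem.Dict.empty : PySem.Dict Int Int)).getD l[i] 0 = i := by
  induction l using List.reverseRecOn with
  | nil => simp at hi
  | append_singleton xs x ih =>
    rw [PySem.List.enumerate_append, List.foldl_append]
    simp only [PySem.List.enumerate, List.foldl]
    by_cases hix : i < xs.length
    · have hne : xs[i] ≠ x := by
        intro h
        have := List.disjoint_of_nodup_append hnd
        exact this (h ▸ List.getElem_mem hix) (by simp)
      rw [List.getElem_append_left hix, PySem.Dict.getD_insert_of_ne _ _ _ hne]
      exact ih (List.Nodup.of_append_left hnd) hix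
    · have hix' : i = xs.length := by simp at hi; omega
      subst hix'
      rw [List.getElem_append_right (le_refl _)]
      simp [PySem.Dict.getD_insert_self]

theorem pv_rank_mono (M : List Int) (hM : M.Pairwise (· < ·)) :
    ∀ a b, a ∈ M → b ∈ M → a < b →
      ((PySem.List.enumerate M).foldl (fun m p => m.insert p.2 p.1) (PySem.Dict.empty : PySem.Dict Int Int)).getD a 0
      < ((PySem.List.enumerate M).foldl (fun m p => m.insert p.2 p.1) (PySem.Dict.empty : PySem.Dict Int Int)).getD b 0 := by
  intro a b ha hb hab
  have hnd : M.Nodup := hM.imp (fun h => ne_of_lt h)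
  obtain ⟨i, hi, rfl⟩ := List.mem_iff_getElem.mp ha
  obtain ⟨j, hj, rfl⟩ := List.mem_iff_getElem.mp hb
  have hij : i < j := by
    rcases lt_trichotomy i j with h | h | h
    · exact h
    · subst h; exact absurd hab (lt_irrefl _)
    · exact absurd (List.pairwise_iff_getElem.mp hM j i hj hi h) (by omega)
  rw [pv_rank_getD M hnd i hi, pv_rank_getD M hnd j hj]
  exact_mod_cast hij

theorem pv_loop_eq (d : PySem.Dict Int (List Int)) (M : List Int) (r : Int → Int)
    (hmono : ∀ a b, a ∈ M → b ∈ M → a < b → r a < r b)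
    (hM : ∀ L : Int, ∀ v ∈ d.getD L [], v ∈ M) :
    ∀ (ls : List Int) (orD indD : PySem.Dict Int (List Int)) (iset cum : List Int),
      iset.Nodup → (∀ v ∈ iset, v ∈ M) →
      cum = (PySem.List.sorted iset (fun x => x)).map r →
      (ls.foldl (fun st L =>
          (st.1.insert L ((PySem.List.sorted (PySem.Set.union st.2.2 (PySem.Set.ofList (d.getD L []))) (fun x => x)).map r),
           st.2.1.insert L ((d.getD L []).map r),
           PySem.Set.union st.2.2 (PySem.Set.ofList (d.getD L []))))
        (orD, indD, iset)).1
        = (ls.foldl (fun st L =>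
            (st.1.insert L ((d.getD L []).map r),
             st.2.1.insert L (((d.getD L []).map r).foldl (fun cum m => binIns cum m) st.2.2),
             ((d.getD L []).map r).foldl (fun cum m => binIns cum m) st.2.2))
          (indD, orD, cum)).2.1
      ∧ (ls.foldl (fun st L =>
          (st.1.insert L ((PySem.List.sorted (PySem.Set.union st.2.2 (PySem.Set.ofList (d.getD L []))) (fun x => x)).map r),
           st.2.1.insert L ((d.getD L []).map r),
           PySem.Set.union st.2.2 (PySem.Set.ofList (d.getD L []))))
        (orD, indD, iset)).2.1
        = (ls.foldl (fun st L =>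
            (st.1.insert L ((d.getD L []).map r),
             st.2.1.insert L (((d.getD L []).map r).foldl (fun cum m => binIns cum m) st.2.2),
             ((d.getD L []).map r).foldl (fun cum m => binIns cum m) st.2.2))
          (indD, orD, cum)).1 := by
  intro ls
  induction ls with
  | nil => intro orD indD iset cum _ _ _; exact ⟨rfl, rfl⟩
  | cons L t ih =>
    intro orD indD iset cum hnd hsub hcum
    rw [List.foldl_cons, List.foldl_cons]
    have hstep : ((d.getD L []).map r).foldl (fun cum m => binIns cum m) cum
        = (PySem.List.sorted (PySem.Set.union iset (PySem.Set.ofList (d.getD L []))) (fun x => x)).map r := by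
      rw [hcum]
      exact pv_bin_step M r hmono iset (d.getD L []) hnd hsub (hM L)
    simp only [hstep]
    refine ih (orD.insert L ((PySem.List.sorted (PySem.Set.union iset (PySem.Set.ofList (d.getD L []))) (fun x => x)).map r))
      (indD.insert L ((d.getD L []).map r))
      (PySem.Set.union iset (PySem.Set.ofList (d.getD L []))) _
      (PySem.Set.nodup_union _ _ hnd) ?_ rfl
    intro v hv
    rcases (PySem.Set.mem_union _ _ _).mp hv with h | h
    · exact hsub v h
    · exact hM L v ((PySem.Set.mem_ofList _ _).mp h)

-- membership survives A's or-dict fold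
theorem pv_loop_contains (d : PySem.Dict Int (List Int)) (r : Int → Int) :
    ∀ (ls : List Int) (st : PySem.Dict Int (List Int) × PySem.Dict Int (List Int) × PySem.Set Int) (L : Int),
      L ∈ ls ∨ st.1.contains L = true →
      ((ls.foldl (fun st L =>
          (st.1.insert L ((PySem.List.sorted (PySem.Set.union st.2.2 (PySem.Set.ofList (d.getD L []))) (fun x => x)).map r),
           st.2.1.insert L ((d.getD L []).map r),
           PySem.Set.union st.2.2 (PySem.Set.ofList (d.getD L []))))
        st).1).contains L = true := by
  intro ls
  induction ls with
  | nil => intro st L h; simpa using h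
  | cons x t ih =>
    intro st L h
    rw [List.foldl_cons]
    apply ih
    rcases h with h | h
    · rcases List.mem_cons.mp h with rfl | h
      · right; simp
      · left; exact h
    · right; simp [PySem.Dict.contains_insert, h]

-- the gap-filling loops agree
theorem pv_fill_eq : ∀ (n : Nat) (t : Int), t < (n : Int) →
    ∀ (od : PySem.Dict Int (List Int)) (prev : List Int), prev = od.getD (t + 1) [] →
    (PySem.List.pyRange t (-1) (-1)).foldl
        (fun od l => if od.contains l then od else od.insert l (od.getD (l + 1) [])) od
      = ((PySem.List.pyRange t (-1) (-1)).foldl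
          (fun s l => if s.1.contains l then (s.1, s.1.getD l []) else (s.1.insert l s.2, s.2)) (od, prev)).1 := by
  intro n
  induction n with
  | zero =>
    intro t ht od prev hprev
    rw [PySem.List.pyRange_neg_one_eq_nil (by omega)]; rfl
  | succ n ih =>
    intro t ht od prev hprev
    by_cases h0 : t ≤ -1
    · rw [PySem.List.pyRange_neg_one_eq_nil h0]; rfl
    · rw [PySem.List.pyRange_neg_one_cons (by omega), List.foldl_cons, List.foldl_cons]
      by_cases hc : od.contains t = true
      · simp only [hc, if_true]
        exact ih (t - 1) (by omega) od (od.getD t []) (by rw [sub_add_cancel])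
      · simp only [hc]
        simp only [if_false, Bool.false_eq_true]
        rw [← hprev]
        exact ih (t - 1) (by omega) (od.insert t prev) prev
          (by rw [sub_add_cancel, PySem.Dict.getD_insert_self])

-- ===== VERDICT (by name: the statement is the Claim_ definition above) =====
theorem get_or_indices_spec : Claim_equal_get_or_indices := by
  intro x _hdom hpre
  unfold Spec_get_or_indices
  unfold Pre_get_or_indices at hpre
  simp only [get_or_indices, get_or_indices_alt]
  set d : PySem.Dict Int (List Int) := PySem.Dict.mk x with hd
  set M : List Int := PySem.List.sorted (PySem.Set.ofList d.values.flatten) (fun x => x) with hM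
  set rk : PySem.Dict Int Int := List.foldl (fun m p => m.insert p.2 p.1) PySem.Dict.empty (PySem.List.enumerate M) with hrk
  set layers : List Int := PySem.List.sorted d.keys (fun x => x) true with hlayers
  have hMpw : M.Pairwise (· < ·) := by
    rw [hM]; exact PySem.List.sorted_ofList_pairwise_lt _
  have hmono : ∀ a b, a ∈ M → b ∈ M → a < b →
      (fun v => rk.getD v 0) a < (fun v => rk.getD v 0) b := by
    intro a b ha hb hab
    exact pv_rank_mono M hMpw a b ha hb hab
  have hMd : ∀ L : Int, ∀ v ∈ d.getD L [], v ∈ M := by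
    intro L v hv
    rw [PySem.Dict.getD_eq_get?_getD] at hv
    cases hg : d.get? L with
    | none => rw [hg] at hv; simp at hv
    | some w =>
      rw [hg] at hv
      simp only [Option.getD_some] at hv
      have hw : (L, w) ∈ d.items := PySem.Dict.mem_items_of_get?_eq_some d hg
      have hwv : w ∈ d.values := by
        simp only [PySem.Dict.values]
        exact List.mem_map.mpr ⟨(L, w), hw, rfl⟩
      rw [hM, PySem.List.mem_sorted, PySem.Set.mem_ofList]
      exact List.mem_flatten.mpr ⟨w, hwv, hv⟩
  have hloop := pv_loop_eq d M (fun v => rk.getD v 0) hmono hMd layers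
    PySem.Dict.empty PySem.Dict.empty PySem.Set.empty []
    List.nodup_nil (by intro v hv; simp [PySem.Set.empty] at hv) rfl
  rw [hloop.2, ← hloop.1]
  have hlne : layers ≠ [] := by
    rw [hlayers]
    rw [Ne, PySem.List.sorted_eq_nil_iff]
    intro h
    apply hpre
    cases x with
    | nil => rfl
    | cons a t => simp [hd, PySem.Dict.keys] at h
  cases hL : layers with
  | nil => exact absurd hL hlne
  | cons T rest =>
    have ht0 : PySem.List.pyGetD (T :: rest) 0 0 = T := by
      rw [PySem.List.pyGetD_zero]; rfl
    rw [ht0]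
    by_cases hT : 0 ≤ T
    · have hcT : (((T :: rest).foldl (fun st L =>
          (st.1.insert L ((PySem.List.sorted (PySem.Set.union st.2.2 (PySem.Set.ofList (d.getD L []))) (fun x => x)).map (fun v => rk.getD v 0)),
           st.2.1.insert L ((d.getD L []).map (fun v => rk.getD v 0)),
           PySem.Set.union st.2.2 (PySem.Set.ofList (d.getD L []))))
          (PySem.Dict.empty, PySem.Dict.empty, PySem.Set.empty)).1).contains T = true := by
        apply pv_loop_contains
        left; exact List.mem_cons_self
      refine congrArg₂ Prod.mk rfl (congrArg₂ Prod.mk ?_ rfl)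
      generalize hg : ((T :: rest).foldl (fun st L =>
          (st.1.insert L ((PySem.List.sorted (PySem.Set.union st.2.2 (PySem.Set.ofList (d.getD L []))) (fun x => x)).map (fun v => rk.getD v 0)),
           st.2.1.insert L ((d.getD L []).map (fun v => rk.getD v 0)),
           PySem.Set.union st.2.2 (PySem.Set.ofList (d.getD L []))))
          (PySem.Dict.empty, PySem.Dict.empty, PySem.Set.empty)).1 = od at hcT ⊢
      rw [PySem.List.pyRange_neg_one_cons (show (-1:Int) < T by omega), List.foldl_cons]
      rw [if_pos hcT]
      exact congrArg PySem.Dict.items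
        (pv_fill_eq (T.toNat + 1) (T - 1) (by omega) _ _ (by rw [sub_add_cancel]))
    · rw [PySem.List.pyRange_neg_one_eq_nil (by omega), PySem.List.pyRange_neg_one_eq_nil (by omega)]
      rfl
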